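-- pv_equiv track=rewrite | github.com/R0U5/Reforge | reforge.py | detect_training_mode
-- ===== SOURCE A (Python) =====
-- TRAINING_SCHEMAS = {
--     "sft": {
--         "required": ["chosen"],
--         "optional": ["question"],
--         "aliases": {
--
--             "chosen": ["response", "chosen", "answer", "answers", "completion",
--             "output", "solution",  "expected_answer", "long_answer", "messages","summary"],
--
--             "question": ["instruction", "question", "prompt", "input",
--             "query", "context", "problem","document"]
--         }
--     },
--     "causal": {
--         "required": ["chosen"],
--         "optional": [],
--         "aliases": {
--             "chosen": ["prompt", "text"]
--         }
--     },
--     "chat": {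
--         "required": ["question"],
--         "optional": [],
--         "aliases": {
--             "question": ["messages"]
--         }
--     },
--     "multimodal": {
--         "required": ["image", "chosen"],
--         "optional": ["question"],
--         "aliases": {
--             "image":    ["image", "img", "pixel", "photo", "image_path", "picture"],
--             "chosen":   ["answer", "response", "chosen", "caption", "completion",
--                          "output", "description", "label"],
--             "question": ["question", "prompt", "instruction", "query", "text"]
--         }
--     }
-- }
--
-- def detect_training_mode(columns):
--     lowered = {col.lower(): col for col in columns}
--
--     # Determine check order: prioritise multimodal when an image-named column is
--     # present, otherwise use schema insertion order.  Without this, "sft" (which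
--     # only requires one "chosen"-aliased column) fires before "multimodal" and
--     # silently swallows image datasets.
--     image_aliases = set(TRAINING_SCHEMAS["multimodal"]["aliases"]["image"])
--     has_image_col = any(col in image_aliases for col in lowered)
--     if has_image_col:
--         check_order = ["multimodal"] + [m for m in TRAINING_SCHEMAS if m != "multimodal"]
--     else:
--         check_order = list(TRAINING_SCHEMAS.keys())
--
--     for mode in check_order:
--         schema  = TRAINING_SCHEMAS[mode]
--         required = schema["required"]
--         aliases  = schema["aliases"]
--         if all(
--             any(alias in lowered for alias in aliases.get(role, []))
--             for role in required
--         ):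
--             return mode
--     raise ValueError(f"[ERROR] Could not detect training mode from columns: {list(columns)}")
-- ===== SOURCE B (Python) =====
-- TRAINING_SCHEMAS = {
--     "sft": {
--         "required": ["chosen"],
--         "optional": ["question"],
--         "aliases": {
--             "chosen": ["response", "chosen", "answer", "answers", "completion",
--             "output", "solution",  "expected_answer", "long_answer", "messages","summary"],
--             "question": ["instruction", "question", "prompt", "input",
--             "query", "context", "problem","document"]
--         }
--     },
--     "causal": {
--         "required": ["chosen"],
--         "optional": [],
--         "aliases": {
--             "chosen": ["prompt", "text"]
--         }
--     },
--     "chat": {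
--         "required": ["question"],
--         "optional": [],
--         "aliases": {
--             "question": ["messages"]
--         }
--     },
--     "multimodal": {
--         "required": ["image", "chosen"],
--         "optional": ["question"],
--         "aliases": {
--             "image":    ["image", "img", "pixel", "photo", "image_path", "picture"],
--             "chosen":   ["answer", "response", "chosen", "caption", "completion",
--                          "output", "description", "label"],
--             "question": ["question", "prompt", "instruction", "query", "text"]
--         }
--     }
-- }
--
--
-- def detect_training_mode(columns):
--     cols = list(columns)  # consume the input exactly once
--     lowcols = [c.lower() for c in cols]
--
--     # Inverted index: alias name -> list of (mode, role) pairs it satisfies.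
--     index = {}
--     for mode, schema in TRAINING_SCHEMAS.items():
--         for role, names in schema["aliases"].items():
--             for name in names:
--                 index.setdefault(name, []).append((mode, role))
--
--     # One pass over the columns, marking every satisfied (mode, role).
--     satisfied = set()
--     for c in lowcols:
--         satisfied.update(index.get(c, []))
--
--     order = list(TRAINING_SCHEMAS)
--     if ("multimodal", "image") in satisfied:
--         order = ["multimodal"] + [m for m in order if m != "multimodal"]
--
--     for mode in order:
--         if all((mode, role) in satisfied for role in TRAINING_SCHEMAS[mode]["required"]):
--             return mode
--     raise ValueError(f"[ERROR] Could not detect training mode from columns: {cols}")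
-- ===== Notes on version B (the rewrite author's own statement) =====
-- stated objective: alternative
-- what changed: B inverts the schema table into an alias->(mode,role) index built once, marks satisfied (mode,role) pairs in a single pass over the columns, and then picks the first mode (multimodal first iff an image alias occurred) whose required roles are all satisfied, instead of A's per-mode nested alias-membership loops over the lowered-column dict.
import Mathlib
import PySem

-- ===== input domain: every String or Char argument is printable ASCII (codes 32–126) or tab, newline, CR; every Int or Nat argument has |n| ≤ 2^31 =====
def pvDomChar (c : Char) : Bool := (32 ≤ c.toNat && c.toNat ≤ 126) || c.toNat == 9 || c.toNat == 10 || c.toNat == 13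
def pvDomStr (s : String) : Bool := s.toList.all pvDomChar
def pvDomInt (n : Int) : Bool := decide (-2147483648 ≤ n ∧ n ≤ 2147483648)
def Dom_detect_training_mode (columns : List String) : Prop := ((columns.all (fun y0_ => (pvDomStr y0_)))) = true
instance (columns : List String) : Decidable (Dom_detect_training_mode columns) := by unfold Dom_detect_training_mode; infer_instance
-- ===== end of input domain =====

-- B replaces A's per-mode nested alias-membership loops by an inverted alias→(mode,role) index
-- and a single pass over the columns (objective: alternative decomposition; same asymptotic cost).
-- Pre_ excludes exactly the inputs on which Python A raises ValueError (no schema matches).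

-- schema value: (required, optional, aliases)
def pvSCHEMAS : PySem.Dict String (List String × List String × PySem.Dict String (List String)) :=
  PySem.Dict.ofList [
    ("sft", (["chosen"], ["question"], PySem.Dict.ofList [
        ("chosen", ["response", "chosen", "answer", "answers", "completion",
                    "output", "solution", "expected_answer", "long_answer", "messages", "summary"]),
        ("question", ["instruction", "question", "prompt", "input",
                      "query", "context", "problem", "document"])])),
    ("causal", (["chosen"], [], PySem.Dict.ofList [
        ("chosen", ["prompt", "text"])])),
    ("chat", (["question"], [], PySem.Dict.ofList [
        ("question", ["messages"])])),
    ("multimodal", (["image", "chosen"], ["question"], PySem.Dict.ofList [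
        ("image", ["image", "img", "pixel", "photo", "image_path", "picture"]),
        ("chosen", ["answer", "response", "chosen", "caption", "completion",
                    "output", "description", "label"]),
        ("question", ["question", "prompt", "instruction", "query", "text"])]))]

-- ===== PORT A =====
-- the 'for mode in check_order' loop (early return); pvSCHEMAS[mode] looked up with a
-- default that is never used (every mode in check_order is a key of pvSCHEMAS)
def pvFindModeA (lowered : PySem.Dict String String) : List String → Option String
  | [] => none
  | mode :: rest =>
    let schema := pvSCHEMAS.getD mode ([], [], PySem.Dict.empty)
    if schema.1.all (fun role => ((schema.2.2).getD role []).any (fun al => lowered.contains al))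
    then some mode else pvFindModeA lowered rest

-- on a non-matching input Python A raises ValueError; the port returns "" there (excluded by Pre_)
def detect_training_mode (columns : List String) : String :=
  let lowered : PySem.Dict String String :=
    columns.foldl (fun d col => d.insert (PySem.Str.lower col) col) PySem.Dict.empty
  let image_aliases : PySem.Set String :=
    PySem.Set.ofList ["image", "img", "pixel", "photo", "image_path", "picture"]
  let has_image_col := (lowered.keys).any (fun col => image_aliases.contains col)
  let check_order :=
    if has_image_col then "multimodal" :: (pvSCHEMAS.keys.filter (fun m => m != "multimodal"))
    else pvSCHEMAS.keys
  (pvFindModeA lowered check_order).getD ""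

-- ===== PORT B =====
-- the 'for mode in order' loop of Source B (early return)
def pvFindModeB (satisfied : PySem.Set (String × String)) : List String → Option String
  | [] => none
  | mode :: rest =>
    if ((pvSCHEMAS.getD mode ([], [], PySem.Dict.empty)).1).all
         (fun role => satisfied.contains (mode, role))
    then some mode else pvFindModeB satisfied rest

-- on a non-matching input Python B raises ValueError; the port returns "" there (excluded by Pre_)
def detect_training_mode_alt (columns : List String) : String :=
  let cols := columns
  let lowcols := cols.map PySem.Str.lower
  -- inverted index alias -> [(mode, role)], built once from the schemas
  let index : PySem.Dict String (List (String × String)) :=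
    pvSCHEMAS.items.foldl (fun d ms =>
      ms.2.2.2.items.foldl (fun d rn =>
        rn.2.foldl (fun d name => d.modify name [] (fun l => l ++ [(ms.1, rn.1)])) d) d)
      PySem.Dict.empty
  -- one pass over the columns marking satisfied (mode, role) pairs
  let satisfied : PySem.Set (String × String) :=
    lowcols.foldl (fun s c => PySem.Set.update s (index.getD c [])) PySem.Set.empty
  let order := pvSCHEMAS.keys
  let order :=
    if satisfied.contains ("multimodal", "image")
    then "multimodal" :: order.filter (fun m => m != "multimodal")
    else order
  (pvFindModeB satisfied order).getD ""

-- ===== PRECONDITION & SPEC =====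
-- Pre_ excludes exactly the inputs on which Python A raises ValueError (no mode's required
-- roles are all matched by some column name); Python B raises the same error there.
def Pre_detect_training_mode (columns : List String) : Prop :=
  (let L := columns.map PySem.Str.lower;
   (L.any (fun c => decide (c ∈ ["response", "chosen", "answer", "answers", "completion",
                                 "output", "solution", "expected_answer", "long_answer",
                                 "messages", "summary"])) ||
    L.any (fun c => decide (c ∈ ["prompt", "text"])) ||
    L.any (fun c => decide (c ∈ ["messages"])) ||
    (L.any (fun c => decide (c ∈ ["image", "img", "pixel", "photo", "image_path", "picture"])) &&
     L.any (fun c => decide (c ∈ ["answer", "response", "chosen", "caption", "completion",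
                                  "output", "description", "label"]))))) = true
instance (columns : List String) : Decidable (Pre_detect_training_mode columns) := by
  unfold Pre_detect_training_mode; infer_instance

def pvWitness_detect_training_mode : List String := ["IMG", "Caption"]

def Spec_detect_training_mode (columns : List String) (out : String) : Prop :=
  out = detect_training_mode_alt columns
instance (columns : List String) (out : String) : Decidable (Spec_detect_training_mode columns out) := by
  unfold Spec_detect_training_mode; infer_instance

-- ===== CLAIM (what is proved, stated in full; the proofs are below) =====
def Claim_equal_detect_training_mode : Prop := ∀ (columns : List String), Dom_detect_training_mode columns → Pre_detect_training_mode columns → Spec_detect_training_mode columns (detect_training_mode columns)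


-- ===== LEMMAS AND PROOFS =====

-- the five alias lists that decide the result (and sft's optional question-role list)
def pvSftL : List String := ["response", "chosen", "answer", "answers", "completion",
  "output", "solution", "expected_answer", "long_answer", "messages", "summary"]
def pvSftQL : List String := ["instruction", "question", "prompt", "input",
  "query", "context", "problem", "document"]
def pvCausalL : List String := ["prompt", "text"]
def pvChatL : List String := ["messages"]
def pvImgL : List String := ["image", "img", "pixel", "photo", "image_path", "picture"]
def pvMmcL : List String := ["answer", "response", "chosen", "caption", "completion",
  "output", "description", "label"]
def pvMmqL : List String := ["question", "prompt", "instruction", "query", "text"]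

def pvHit (L al : List String) : Bool := L.any (fun c => decide (c ∈ al))

def pvDecision (i s c h m : Bool) : String :=
  if i then
    (if i && m then "multimodal" else if s then "sft" else if c then "causal"
     else if h then "chat" else "")
  else
    (if s then "sft" else if c then "causal" else if h then "chat"
     else if i && m then "multimodal" else "")

theorem pvAny_comm (L al : List String) :
    (al.any fun a => decide (a ∈ L)) = (L.any fun c => decide (c ∈ al)) := by
  rw [Bool.eq_iff_iff]
  simp only [List.any_eq_true, decide_eq_true_eq]
  tauto

theorem pvA_char (columns : List String) :
    detect_training_mode columns =
      pvDecision (pvHit (columns.map PySem.Str.lower) pvImgL)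
                 (pvHit (columns.map PySem.Str.lower) pvSftL)
                 (pvHit (columns.map PySem.Str.lower) pvCausalL)
                 (pvHit (columns.map PySem.Str.lower) pvChatL)
                 (pvHit (columns.map PySem.Str.lower) pvMmcL) := by
  simp only [detect_training_mode]
  set L := columns.map PySem.Str.lower with hL
  set d := columns.foldl (fun d col => d.insert (PySem.Str.lower col) col) PySem.Dict.empty with hd
  have hk : d.keys = PySem.Set.ofList L := by
    rw [hd, PySem.Dict.keys_foldl_insert_key]
    simp [PySem.Set.update_nil_left, hL]
  have hc : ∀ a, d.contains a = decide (a ∈ L) := by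
    intro a
    rw [PySem.Dict.contains_eq_decide_mem_keys, hk]
    simp [PySem.Set.mem_ofList]
  have himg : (d.keys.any fun col =>
      (PySem.Set.ofList ["image", "img", "pixel", "photo", "image_path", "picture"]).contains col)
      = pvHit L pvImgL := by
    rw [hk, Bool.eq_iff_iff]
    simp [List.any_eq_true, PySem.Set.mem_ofList, pvHit, pvImgL]
  have hordf : (pvSCHEMAS.keys.filter (fun m => m != "multimodal")) = ["sft", "causal", "chat"] := rfl
  have hord : pvSCHEMAS.keys = ["sft", "causal", "chat", "multimodal"] := rfl
  have hgsft : pvSCHEMAS.getD "sft" ([], [], PySem.Dict.empty)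
      = (["chosen"], ["question"], PySem.Dict.ofList [("chosen", pvSftL), ("question", pvSftQL)]) := rfl
  have hgcau : pvSCHEMAS.getD "causal" ([], [], PySem.Dict.empty)
      = (["chosen"], [], PySem.Dict.ofList [("chosen", pvCausalL)]) := rfl
  have hgchat : pvSCHEMAS.getD "chat" ([], [], PySem.Dict.empty)
      = (["question"], [], PySem.Dict.ofList [("question", pvChatL)]) := rfl
  have hgmm : pvSCHEMAS.getD "multimodal" ([], [], PySem.Dict.empty)
      = (["image", "chosen"], ["question"],
         PySem.Dict.ofList [("image", pvImgL), ("chosen", pvMmcL), ("question", pvMmqL)]) := rfl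
  have ga1 : (PySem.Dict.ofList [("chosen", pvSftL), ("question", pvSftQL)]).getD "chosen" [] = pvSftL := rfl
  have ga2 : (PySem.Dict.ofList [("chosen", pvCausalL)]).getD "chosen" [] = pvCausalL := rfl
  have ga3 : (PySem.Dict.ofList [("question", pvChatL)]).getD "question" [] = pvChatL := rfl
  have ga4 : (PySem.Dict.ofList [("image", pvImgL), ("chosen", pvMmcL), ("question", pvMmqL)]).getD "image" [] = pvImgL := rfl
  have ga5 : (PySem.Dict.ofList [("image", pvImgL), ("chosen", pvMmcL), ("question", pvMmqL)]).getD "chosen" [] = pvMmcL := rfl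
  have hany : ∀ al : List String, (al.any fun a => d.contains a) = pvHit L al := by
    intro al
    simp only [hc]
    rw [pvAny_comm, pvHit]
  rw [himg]
  cases hI : pvHit L pvImgL with
  | true =>
    simp only [if_true, hordf,
      pvFindModeA, hgsft, hgcau, hgchat, hgmm, List.all_cons, List.all_nil,
      ga1, ga2, ga3, ga4, ga5, hany, hI, Bool.and_true, pvDecision]
    cases hS : pvHit L pvSftL <;> cases hC : pvHit L pvCausalL <;>
      cases hH : pvHit L pvChatL <;> cases hM : pvHit L pvMmcL <;> simp
  | false =>
    simp only [if_false, Bool.false_eq_true, hord,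
      pvFindModeA, hgsft, hgcau, hgchat, hgmm, List.all_cons, List.all_nil,
      ga1, ga2, ga3, ga4, ga5, hany, hI, Bool.and_true, pvDecision]
    cases hS : pvHit L pvSftL <;> cases hC : pvHit L pvCausalL <;>
      cases hH : pvHit L pvChatL <;> cases hM : pvHit L pvMmcL <;> simp

-- the flattened (alias, (mode, role)) list that B's triple loop builds its index from
def pvBig : List (String × (String × String)) :=
  (pvSftL.map (fun a => (a, ("sft", "chosen")))) ++
  (pvSftQL.map (fun a => (a, ("sft", "question")))) ++
  (pvCausalL.map (fun a => (a, ("causal", "chosen")))) ++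
  (pvChatL.map (fun a => (a, ("chat", "question")))) ++
  (pvImgL.map (fun a => (a, ("multimodal", "image")))) ++
  (pvMmcL.map (fun a => (a, ("multimodal", "chosen")))) ++
  (pvMmqL.map (fun a => (a, ("multimodal", "question"))))

theorem pvMem_foldl_update {g : String → List (String × String)}
    (l : List String) (s : PySem.Set (String × String)) (y : String × String) :
    (y ∈ l.foldl (fun s c => PySem.Set.update s (g c)) s) ↔ y ∈ s ∨ ∃ c ∈ l, y ∈ g c := by
  induction l generalizing s with
  | nil => simp
  | cons x t ih =>
    simp only [List.foldl_cons, ih, PySem.Set.mem_update]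
    constructor
    · rintro ((h | h) | ⟨c, hc, hy⟩)
      · exact Or.inl h
      · exact Or.inr ⟨x, by simp, h⟩
      · exact Or.inr ⟨c, by simp [hc], hy⟩
    · rintro (h | ⟨c, hc, hy⟩)
      · exact Or.inl (Or.inl h)
      · rcases List.mem_cons.mp hc with rfl | hc
        · exact Or.inl (Or.inr hy)
        · exact Or.inr ⟨c, hc, hy⟩


theorem pvMemBig_sft (c : String) :
    ((("sft", "chosen") : String × String) ∈ (pvBig.filter (fun p => p.1 == c)).map (·.2)) ↔ c ∈ pvSftL := by
  simp [pvBig, pvSftL, pvSftQL, pvCausalL, pvChatL, pvImgL, pvMmcL, pvMmqL, List.mem_filter]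
  try tauto

theorem pvMemBig_cau (c : String) :
    ((("causal", "chosen") : String × String) ∈ (pvBig.filter (fun p => p.1 == c)).map (·.2)) ↔ c ∈ pvCausalL := by
  simp [pvBig, pvSftL, pvSftQL, pvCausalL, pvChatL, pvImgL, pvMmcL, pvMmqL, List.mem_filter]
  try tauto

theorem pvMemBig_chat (c : String) :
    ((("chat", "question") : String × String) ∈ (pvBig.filter (fun p => p.1 == c)).map (·.2)) ↔ c ∈ pvChatL := by
  simp [pvBig, pvSftL, pvSftQL, pvCausalL, pvChatL, pvImgL, pvMmcL, pvMmqL, List.mem_filter]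
  try tauto

theorem pvMemBig_img (c : String) :
    ((("multimodal", "image") : String × String) ∈ (pvBig.filter (fun p => p.1 == c)).map (·.2)) ↔ c ∈ pvImgL := by
  simp [pvBig, pvSftL, pvSftQL, pvCausalL, pvChatL, pvImgL, pvMmcL, pvMmqL, List.mem_filter]
  try tauto

theorem pvMemBig_mmc (c : String) :
    ((("multimodal", "chosen") : String × String) ∈ (pvBig.filter (fun p => p.1 == c)).map (·.2)) ↔ c ∈ pvMmcL := by
  simp [pvBig, pvSftL, pvSftQL, pvCausalL, pvChatL, pvImgL, pvMmcL, pvMmqL, List.mem_filter]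
  try tauto

set_option maxRecDepth 8192 in
set_option maxHeartbeats 1000000 in
theorem pvB_char (columns : List String) :
    detect_training_mode_alt columns =
      pvDecision (pvHit (columns.map PySem.Str.lower) pvImgL)
                 (pvHit (columns.map PySem.Str.lower) pvSftL)
                 (pvHit (columns.map PySem.Str.lower) pvCausalL)
                 (pvHit (columns.map PySem.Str.lower) pvChatL)
                 (pvHit (columns.map PySem.Str.lower) pvMmcL) := by
  simp only [detect_training_mode_alt]
  set L := columns.map PySem.Str.lower with hL
  set index := pvSCHEMAS.items.foldl (fun d ms =>
      ms.2.2.2.items.foldl (fun d rn =>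
        rn.2.foldl (fun d name => d.modify name [] (fun l => l ++ [(ms.1, rn.1)])) d) d)
      PySem.Dict.empty with hidx
  have hflat : index = pvBig.foldl (fun d p => d.modify p.1 [] (fun l => l ++ [p.2])) PySem.Dict.empty := by
    rw [hidx]; decide
  have hgetD : ∀ c, index.getD c [] = (pvBig.filter (fun p => p.1 == c)).map (·.2) := by
    intro c
    rw [hflat, PySem.Dict.getD_foldl_modify_append]
    simp
  set satisfied := L.foldl (fun s c => PySem.Set.update s (index.getD c [])) PySem.Set.empty with hsat
  have hmem : ∀ y : String × String, (y ∈ satisfied) ↔ ∃ c ∈ L, y ∈ index.getD c [] := by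
    intro y
    rw [hsat, pvMem_foldl_update]
    simp [PySem.Set.empty]
  have hmemL : ∀ (y : String × String) (al : List String),
      (∀ c, (y ∈ (pvBig.filter (fun p => p.1 == c)).map (·.2)) ↔ c ∈ al) →
      ((y ∈ satisfied) ↔ pvHit L al = true) := by
    intro y al h
    rw [hmem]
    simp only [hgetD, h, pvHit, List.any_eq_true, decide_eq_true_eq]
  have hsft : ((("sft", "chosen") : String × String) ∈ satisfied) ↔ pvHit L pvSftL = true :=
    hmemL _ _ pvMemBig_sft
  have hcau : ((("causal", "chosen") : String × String) ∈ satisfied) ↔ pvHit L pvCausalL = true :=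
    hmemL _ _ pvMemBig_cau
  have hchat : ((("chat", "question") : String × String) ∈ satisfied) ↔ pvHit L pvChatL = true :=
    hmemL _ _ pvMemBig_chat
  have himg : ((("multimodal", "image") : String × String) ∈ satisfied) ↔ pvHit L pvImgL = true :=
    hmemL _ _ pvMemBig_img
  have hmmc : ((("multimodal", "chosen") : String × String) ∈ satisfied) ↔ pvHit L pvMmcL = true :=
    hmemL _ _ pvMemBig_mmc
  have hord : pvSCHEMAS.keys = ["sft", "causal", "chat", "multimodal"] := rfl
  have hr1 : (pvSCHEMAS.getD "sft" ([], [], PySem.Dict.empty)).1 = ["chosen"] := rfl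
  have hr2 : (pvSCHEMAS.getD "causal" ([], [], PySem.Dict.empty)).1 = ["chosen"] := rfl
  have hr3 : (pvSCHEMAS.getD "chat" ([], [], PySem.Dict.empty)).1 = ["question"] := rfl
  have hr4 : (pvSCHEMAS.getD "multimodal" ([], [], PySem.Dict.empty)).1 = ["image", "chosen"] := rfl
  cases hI : pvHit L pvImgL <;>
    cases hS : pvHit L pvSftL <;> cases hC : pvHit L pvCausalL <;>
      cases hH : pvHit L pvChatL <;> cases hM : pvHit L pvMmcL <;>
        simp [pvFindModeB, hord, hr1, hr2, hr3, hr4,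
          hsft, hcau, hchat, himg, hmmc, hI, hS, hC, hH, hM, pvDecision]

-- ===== VERDICT (by name: the statement is the Claim_ definition above) =====
theorem detect_training_mode_spec : Claim_equal_detect_training_mode := by
  intro columns _ _
  unfold Spec_detect_training_mode
  rw [pvA_char, pvB_char]
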